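-- pv_equiv track=rewrite | github.com/DonAlvarado/Proyecto2EDI | Lab01/Lab01.py | find_recommendations
-- ===== SOURCE A (Python) =====
-- def find_recommendations(input1, input2):
--     recommendations = []
--     min_total_distance = float('inf')
--     min_max_distance = float('inf')
--     n = len(input1)
--
--     for i in range(n):
--         total_distance = 0
--         max_distance = 0
--         valid_apartment = True
--         apartment = input1[i]
--         #Aqui se analiza los requerimientos del input 2 en el input1 actual
--         for requirement in input2:
--             if not apartment.get(requirement, False):
--                 distance = find_distance(input1, i, requirement, n)
--                 #Aqui se verifica si el apartamento es valido
--                 if distance == -1: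
--                     valid_apartment = False
--                     break
--
--                 total_distance += distance
--                 max_distance = max(max_distance, distance)
--         #Si el apartamento es valido, se verifica si es mejor que los anteriores
--         if valid_apartment:
--             if (total_distance < min_total_distance or
--                 (total_distance == min_total_distance and max_distance < min_max_distance)):
--                 min_total_distance = total_distance
--                 min_max_distance = max_distance
--                 recommendations = [i]
--             elif total_distance == min_total_distance and max_distance == min_max_distance:
--                 recommendations.append(i)
--     return recommendations
--
-- def find_distance(input1, start_index, requirement, n):
--     for i in range(1, n):
--         if start_index + i < n and input1[start_index + i].get(requirement, False):
--             return i
--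
--         if start_index - i >= 0 and input1[start_index - i].get(requirement, False):
--             return i
--     return -1
-- ===== SOURCE B (Python) =====
-- def find_recommendations(input1, input2):
--     n = len(input1)
--
--     # a requested feature that is no apartment's key is satisfied nowhere: no apartment can qualify
--     for req in input2:
--         if not any(req in apt for apt in input1):
--             return []
--
--     def nearest(req):
--         # forward/backward sweeps: d[i] = distance from i to nearest apartment having req
--         d = [None] * n
--         last = None
--         for i in range(n):
--             if input1[i].get(req, False):
--                 last = i
--             if last is not None:
--                 d[i] = i - last
--         nxt = None
--         for i in range(n - 1, -1, -1):
--             if input1[i].get(req, False):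
--                 nxt = i
--             if nxt is not None and (d[i] is None or nxt - i < d[i]):
--                 d[i] = nxt - i
--         return d
--
--     dists = [nearest(req) for req in input2]
--
--     best = None
--     recs = []
--     for i in range(n):
--         total = 0
--         mx = 0
--         ok = True
--         for d in dists:
--             di = d[i]
--             if di is None:
--                 ok = False
--                 break
--             total += di
--             if di > mx:
--                 mx = di
--         if ok and (best is None or (total, mx) < best):
--             best = (total, mx)
--             recs = [i]
--         elif ok and (total, mx) == best:
--             recs.append(i)
--     return recs
-- ===== Notes on version B (the rewrite author's own statement) =====
-- stated objective: faster
-- what changed: B checks up front that every requested feature is some apartment's key (otherwise no apartment qualifies and it returns [] immediately), and scores apartments against per-requirement nearest-feature distance arrays built by one forward and one backward sweep, instead of A's outward scan from each apartment for each missing requirement.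
import Mathlib
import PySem

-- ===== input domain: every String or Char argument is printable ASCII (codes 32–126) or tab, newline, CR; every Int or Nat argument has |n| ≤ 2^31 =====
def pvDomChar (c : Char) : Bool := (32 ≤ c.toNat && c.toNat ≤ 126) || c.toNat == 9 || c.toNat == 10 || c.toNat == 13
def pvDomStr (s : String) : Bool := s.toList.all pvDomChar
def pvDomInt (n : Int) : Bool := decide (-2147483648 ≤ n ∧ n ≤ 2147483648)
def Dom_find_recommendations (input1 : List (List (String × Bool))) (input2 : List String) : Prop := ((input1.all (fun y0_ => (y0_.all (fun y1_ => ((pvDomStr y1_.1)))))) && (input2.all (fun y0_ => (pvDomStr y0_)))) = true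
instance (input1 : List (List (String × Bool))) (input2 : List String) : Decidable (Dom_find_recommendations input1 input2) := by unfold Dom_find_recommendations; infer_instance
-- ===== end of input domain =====

-- B first returns [] early when some requested feature is no apartment's key (then no apartment
-- qualifies), and otherwise replaces A's per-apartment outward scan per requirement by one
-- forward and one backward nearest-feature sweep per requirement plus a single scoring pass
-- (objective: faster; confirmed).


-- ===== PORT A =====

-- apartment.get(requirement, False): first-match association-list lookup (Python dicts have unique keys)
def pyGetB (apt : List (String × Bool)) (k : String) : Bool :=
  ((apt.find? (fun p => p.1 == k)).map Prod.snd).getD false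

-- the body of find_distance's `for i in range(1, n)` loop with its early returns
def find_distance_loop (input1 : List (List (String × Bool))) (start_index : Int)
    (requirement : String) (n : Int) : List Int → Int
  | [] => -1
  | i :: rest =>
    if start_index + i < n ∧ pyGetB ((PySem.List.pyGet? input1 (start_index + i)).getD []) requirement then i
    else if 0 ≤ start_index - i ∧ pyGetB ((PySem.List.pyGet? input1 (start_index - i)).getD []) requirement then i
    else find_distance_loop input1 start_index requirement n rest

def find_distance (input1 : List (List (String × Bool))) (start_index : Int)
    (requirement : String) (n : Int) : Int :=
  find_distance_loop input1 start_index requirement n (PySem.List.pyRange 1 n 1)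

-- A's inner `for requirement in input2` loop: returns (valid_apartment, total_distance, max_distance)
def innerA (input1 : List (List (String × Bool))) (apartment : List (String × Bool))
    (i : Int) (n : Int) : List String → Int → Int → Bool × Int × Int
  | [], total, mx => (true, total, mx)
  | req :: rest, total, mx =>
    if !(pyGetB apartment req) then
      let distance := find_distance input1 i req n
      if distance = -1 then (false, total, mx)
      else innerA input1 apartment i n rest (total + distance) (max mx distance)
    else innerA input1 apartment i n rest total mx

-- float('inf') sentinels ported as `none` (= +infinity); exact: all compared totals are finite ints
def ltInf (t : Int) : Option Int → Bool
  | none => true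
  | some v => t < v

def eqInf (t : Int) : Option Int → Bool
  | none => false
  | some v => t = v

-- the body of A's outer `for i in range(n)` loop
def stepA (input1 : List (List (String × Bool))) (input2 : List String)
    (st : List Int × Option Int × Option Int) (i : Nat) : List Int × Option Int × Option Int :=
  let apartment := input1.getD i []   -- input1[i], i ∈ range(len(input1))
  let r := innerA input1 apartment (i : Int) (input1.length : Int) input2 0 0
  if r.1 then
    if ltInf r.2.1 st.2.1 || (eqInf r.2.1 st.2.1 && ltInf r.2.2 st.2.2) then
      ([(i : Int)], some r.2.1, some r.2.2)
    else if eqInf r.2.1 st.2.1 && eqInf r.2.2 st.2.2 then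
      (st.1 ++ [(i : Int)], st.2.1, st.2.2)
    else st
  else st

def find_recommendations (input1 : List (List (String × Bool))) (input2 : List String) : List Int :=
  ((List.range input1.length).foldl (stepA input1 input2) ([], none, none)).1

-- ===== PORT B =====

-- forward sweep (building d left to right) then backward sweep (in-place updates ported as List.set)
def fstepB (input1 : List (List (String × Bool))) (req : String)
    (st : Option Int × List (Option Int)) (i : Nat) : Option Int × List (Option Int) :=
  let last := if pyGetB (input1.getD i []) req then some (i : Int) else st.1
  (last, st.2 ++ [last.map (fun l => (i : Int) - l)])

def bstepB (input1 : List (List (String × Bool))) (req : String)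
    (st : Option Int × List (Option Int)) (i : Nat) : Option Int × List (Option Int) :=
  let nxt := if pyGetB (input1.getD i []) req then some (i : Int) else st.1
  let d := match nxt with
    | none => st.2
    | some nx => match st.2.getD i none with
      | none => st.2.set i (some (nx - (i : Int)))
      | some cur => if nx - (i : Int) < cur then st.2.set i (some (nx - (i : Int))) else st.2
  (nxt, d)

def nearestArr (input1 : List (List (String × Bool))) (req : String) : List (Option Int) :=
  let n := input1.length
  let fwd := (List.range n).foldl (fstepB input1 req) (none, [])
  let bwd := ((List.range n).reverse).foldl (bstepB input1 req) (none, fwd.2)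
  bwd.2

-- B's scoring loop over the precomputed arrays: d[i] ported as getD (always in range: each array has length n)
def innerB : List (List (Option Int)) → Nat → Int → Int → Bool × Int × Int
  | [], _, total, mx => (true, total, mx)
  | d :: rest, i, total, mx =>
    match d.getD i none with
    | none => (false, total, mx)
    | some di => innerB rest i (total + di) (if di > mx then di else mx)

-- the body of B's scoring `for i in range(n)` loop
def stepB (dists : List (List (Option Int))) (st : List Int × Option (Int × Int)) (i : Nat) :
    List Int × Option (Int × Int) :=
  let r := innerB dists i 0 0
  if r.1 && (match st.2 with
             | none => true
             | some b => r.2.1 < b.1 || (r.2.1 = b.1 && r.2.2 < b.2)) then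
    ([(i : Int)], some (r.2.1, r.2.2))
  else if r.1 && (match st.2 with
                  | none => false
                  | some b => r.2.1 = b.1 && r.2.2 = b.2) then
    (st.1 ++ [(i : Int)], st.2)
  else st

def find_recommendations_alt (input1 : List (List (String × Bool))) (input2 : List String) : List Int :=
  -- B's early-return loop: a requested feature that is no apartment's key (`req in apt`)
  -- is satisfied nowhere, so no apartment can qualify and the result is []
  if input2.all (fun req => input1.any (fun row => row.any (fun p => p.1 == req))) then
    let dists := input2.map (nearestArr input1)
    ((List.range input1.length).foldl (stepB dists) ([], none)).1
  else []

-- ===== PRECONDITION & SPEC =====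
def Spec_find_recommendations (input1 : List (List (String × Bool))) (input2 : List String) (out : List Int) : Prop := out = find_recommendations_alt input1 input2
instance (input1 : List (List (String × Bool))) (input2 : List String) (out : List Int) : Decidable (Spec_find_recommendations input1 input2 out) := by unfold Spec_find_recommendations; infer_instance

-- ===== CLAIM (what is proved, stated in full; the proofs are below) =====
def Claim_equal_find_recommendations : Prop := ∀ (input1 : List (List (String × Bool))) (input2 : List String), Dom_find_recommendations input1 input2 → Spec_find_recommendations input1 input2 (find_recommendations input1 input2)

-- ===== LEMMAS AND PROOFS =====

-- `apartment i has requirement req`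
def hasR (rows : List (List (String × Bool))) (req : String) (j : Nat) : Bool :=
  pyGetB (rows.getD j []) req

-- largest j ≤ i with hasR j
def lastHas (rows : List (List (String × Bool))) (req : String) : Nat → Option Nat
  | 0 => if hasR rows req 0 then some 0 else none
  | j + 1 => if hasR rows req (j + 1) then some (j + 1) else lastHas rows req j

-- smallest j with i ≤ j < i + fuel and hasR j
def nextHasAux (rows : List (List (String × Bool))) (req : String) : Nat → Nat → Option Nat
  | 0, _ => none
  | f + 1, i => if hasR rows req i then some i else nextHasAux rows req f (i + 1)

def nextHas (rows : List (List (String × Bool))) (req : String) (i : Nat) : Option Nat :=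
  nextHasAux rows req (rows.length - i) i

-- distance from i to the nearest apartment having req (none if req occurs nowhere)
def nd (rows : List (List (String × Bool))) (req : String) (i : Nat) : Option Nat :=
  match lastHas rows req i, nextHas rows req i with
  | none, none => none
  | some l, none => some (i - l)
  | none, some r => some (r - i)
  | some l, some r => some (min (i - l) (r - i))

lemma lastHas_spec (rows : List (List (String × Bool))) (req : String) (i : Nat) :
    (∀ l, lastHas rows req i = some l → l ≤ i ∧ hasR rows req l = true ∧
      (∀ k, l < k → k ≤ i → hasR rows req k = false)) ∧
    (lastHas rows req i = none → ∀ k, k ≤ i → hasR rows req k = false) := by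
  induction i with
  | zero =>
    constructor
    · intro l hl
      simp only [lastHas] at hl
      split at hl
      · cases hl
        refine ⟨le_refl _, by assumption, ?_⟩
        intro k hk hk'; omega
      · cases hl
    · intro h k hk
      simp only [lastHas] at h
      split at h
      · cases h
      · interval_cases k
        simpa using Bool.not_eq_true _ |>.mp (by simp_all)
  | succ j ih =>
    constructor
    · intro l hl
      simp only [lastHas] at hl
      split at hl
      · cases hl
        refine ⟨le_refl _, by assumption, ?_⟩
        intro k hk hk'; omega
      · rename_i hnot
        obtain ⟨h1, h2, h3⟩ := ih.1 l hl
        refine ⟨by omega, h2, ?_⟩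
        intro k hk hk'
        rcases Nat.lt_or_ge k (j+1) with h | h
        · exact h3 k hk (by omega)
        · have : k = j + 1 := by omega
          subst this
          simpa using hnot
    · intro h k hk
      simp only [lastHas] at h
      split at h
      · cases h
      · rename_i hnot
        rcases Nat.lt_or_ge k (j+1) with hc | hc
        · exact ih.2 h k (by omega)
        · have : k = j + 1 := by omega
          subst this
          simpa using hnot
lemma nextHasAux_spec (rows : List (List (String × Bool))) (req : String) :
    ∀ (f i : Nat),
    (∀ r, nextHasAux rows req f i = some r → i ≤ r ∧ r < i + f ∧ hasR rows req r = true ∧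
      (∀ k, i ≤ k → k < r → hasR rows req k = false)) ∧
    (nextHasAux rows req f i = none → ∀ k, i ≤ k → k < i + f → hasR rows req k = false) := by
  intro f
  induction f with
  | zero =>
    intro i
    constructor
    · intro r hr; cases hr
    · intro _ k hk hk'; omega
  | succ g ih =>
    intro i
    constructor
    · intro r hr
      simp only [nextHasAux] at hr
      split at hr
      · cases hr
        refine ⟨le_refl _, by omega, by assumption, ?_⟩
        intro k hk hk'; omega
      · rename_i hnot
        obtain ⟨h1, h2, h3, h4⟩ := (ih (i+1)).1 r hr
        refine ⟨by omega, by omega, h3, ?_⟩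
        intro k hk hk'
        rcases Nat.lt_or_ge k (i+1) with hc | hc
        · have : k = i := by omega
          subst this; simpa using hnot
        · exact h4 k hc hk'
    · intro h k hk hk'
      simp only [nextHasAux] at h
      split at h
      · cases h
      · rename_i hnot
        rcases Nat.lt_or_ge k (i+1) with hc | hc
        · have : k = i := by omega
          subst this; simpa using hnot
        · exact (ih (i+1)).2 h k hc (by omega)

lemma nextHas_spec (rows : List (List (String × Bool))) (req : String) (i : Nat) :
    (∀ r, nextHas rows req i = some r → i ≤ r ∧ r < rows.length ∧ hasR rows req r = true ∧
      (∀ k, i ≤ k → k < r → hasR rows req k = false)) ∧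
    (nextHas rows req i = none → ∀ k, i ≤ k → k < rows.length → hasR rows req k = false) := by
  have h := nextHasAux_spec rows req (rows.length - i) i
  constructor
  · intro r hr
    obtain ⟨h1, h2, h3, h4⟩ := h.1 r hr
    exact ⟨h1, by omega, h3, h4⟩
  · intro hn k hk hk'
    exact h.2 hn k hk (by omega)

lemma nextHas_rec (rows : List (List (String × Bool))) (req : String) (i : Nat)
    (h : i < rows.length) :
    nextHas rows req i = if hasR rows req i then some i else nextHas rows req (i + 1) := by
  have he : rows.length - i = (rows.length - (i + 1)) + 1 := by omega
  simp only [nextHas, he, nextHasAux]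

lemma nd_self (rows : List (List (String × Bool))) (req : String) (i : Nat)
    (hi : i < rows.length) (hy : hasR rows req i = true) : nd rows req i = some 0 := by
  have hl : lastHas rows req i = some i := by
    cases i with
    | zero => simp [lastHas, hy]
    | succ j => simp [lastHas, hy]
  have hn : nextHas rows req i = some i := by
    rw [nextHas_rec rows req i hi, hy]; simp
  simp [nd, hl, hn]
-- the guard of find_distance's loop body at offset d
def Gd (rows : List (List (String × Bool))) (s : Int) (req : String) (n : Int) (d : Int) : Prop :=
  (s + d < n ∧ pyGetB ((PySem.List.pyGet? rows (s + d)).getD []) req) ∨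
  (0 ≤ s - d ∧ pyGetB ((PySem.List.pyGet? rows (s - d)).getD []) req)

lemma loop_none (rows : List (List (String × Bool))) (s : Int) (req : String) (n : Int) :
    ∀ (a : Int), (∀ d, a ≤ d → d < n → ¬ Gd rows s req n d) →
    find_distance_loop rows s req n (PySem.List.pyRange a n 1) = -1 := by
  intro a
  by_cases hab : a < n
  · have hsz : (n - a).toNat ≠ 0 := by omega
    generalize hk : (n - a).toNat = k at hsz
    induction k generalizing a with
    | zero => omega
    | succ j ih =>
      intro hno
      rw [PySem.List.pyRange_one_cons hab]
      have hna : ¬ Gd rows s req n a := hno a (le_refl _) hab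
      simp only [find_distance_loop]
      rw [if_neg (fun h => hna (Or.inl h)), if_neg (fun h => hna (Or.inr h))]
      by_cases hab' : a + 1 < n
      · exact ih (a+1) hab' (by omega) (by omega) (fun d h1 h2 => hno d (by omega) h2)
      · rw [PySem.List.pyRange_one_eq_nil (by omega)]
        rfl
  · intro _
    rw [PySem.List.pyRange_one_eq_nil (by omega)]
    rfl

lemma loop_min (rows : List (List (String × Bool))) (s : Int) (req : String) (n : Int)
    (m : Int) (hmn : m < n) (hG : Gd rows s req n m) :
    ∀ (a : Int), a ≤ m → (∀ d, a ≤ d → d < m → ¬ Gd rows s req n d) →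
    find_distance_loop rows s req n (PySem.List.pyRange a n 1) = m := by
  intro a
  induction hk : (m - a).toNat generalizing a with
  | zero =>
    intro ham _
    have : a = m := by omega
    subst this
    rw [PySem.List.pyRange_one_cons (by omega)]
    simp only [find_distance_loop]
    split_ifs with h1 h2
    · rfl
    · rfl
    · rcases hG with h | h
      · exact absurd h h1
      · exact absurd h h2
  | succ j ih =>
    intro ham hno
    have hab : a < n := by omega
    rw [PySem.List.pyRange_one_cons hab]
    have hna : ¬ Gd rows s req n a := hno a (le_refl _) (by omega)
    simp only [find_distance_loop]
    rw [if_neg (fun h => hna (Or.inl h)), if_neg (fun h => hna (Or.inr h))]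
    exact ih (a+1) (by omega) (by omega) (fun d h1 h2 => hno d (by omega) h2)
lemma Gd_iff (rows : List (List (String × Bool))) (req : String) (i : Nat) (d : Int)
    (hd : 1 ≤ d) :
    Gd rows (i : Int) req (rows.length : Int) d ↔
      ((i + d.toNat < rows.length ∧ hasR rows req (i + d.toNat) = true) ∨
       (d.toNat ≤ i ∧ hasR rows req (i - d.toNat) = true)) := by
  unfold Gd hasR
  have e1 : (i : Int) + d = ((i + d.toNat : Nat) : Int) := by omega
  have g1 : (PySem.List.pyGet? rows ((i : Int) + d)).getD [] = rows.getD (i + d.toNat) [] := by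
    rw [e1, PySem.List.pyGet?_natCast]
    rw [List.getD_eq_getElem?_getD]
  constructor
  · rintro (⟨h, hb⟩ | ⟨h, hb⟩)
    · left
      exact ⟨by omega, by rwa [g1] at hb⟩
    · right
      have e2 : (i : Int) - d = ((i - d.toNat : Nat) : Int) := by omega
      rw [e2, PySem.List.pyGet?_natCast, ← List.getD_eq_getElem?_getD] at hb
      exact ⟨by omega, hb⟩
  · rintro (⟨h, hb⟩ | ⟨h, hb⟩)
    · left
      rw [g1]
      exact ⟨by omega, hb⟩
    · right
      have e2 : (i : Int) - d = ((i - d.toNat : Nat) : Int) := by omega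
      refine ⟨by omega, ?_⟩
      rw [e2, PySem.List.pyGet?_natCast, ← List.getD_eq_getElem?_getD]
      exact hb

lemma nd_none_facts (rows : List (List (String × Bool))) (req : String) (i : Nat)
    (hnd : nd rows req i = none) :
    ∀ k, k < rows.length → hasR rows req k = false := by
  unfold nd at hnd
  rcases hl : lastHas rows req i with _ | l <;> rcases hr : nextHas rows req i with _ | r <;>
    rw [hl, hr] at hnd <;> simp at hnd
  intro k hk
  rcases Nat.lt_or_ge i k with hc | hc
  · exact (nextHas_spec rows req i).2 hr k (by omega) hk
  · exact (lastHas_spec rows req i).2 hl k hc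

lemma nd_some_facts (rows : List (List (String × Bool))) (req : String) (i : Nat)
    (hi : i < rows.length) (hno : hasR rows req i = false) (m : Nat)
    (hnd : nd rows req i = some m) :
    1 ≤ m ∧ m < rows.length ∧
    ((i + m < rows.length ∧ hasR rows req (i + m) = true) ∨
     (m ≤ i ∧ hasR rows req (i - m) = true)) ∧
    (∀ e, 1 ≤ e → e < m →
      ¬((i + e < rows.length ∧ hasR rows req (i + e) = true) ∨
        (e ≤ i ∧ hasR rows req (i - e) = true))) := by
  unfold nd at hnd
  rcases hl : lastHas rows req i with _ | l <;> rcases hr : nextHas rows req i with _ | r <;>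
    rw [hl, hr] at hnd <;> simp at hnd
  · -- lastHas none, nextHas some r
    obtain ⟨hir, hrlen, hhr, hminr⟩ := (nextHas_spec rows req i).1 r hr
    have hne : r ≠ i := fun h => by rw [h, hno] at hhr; cases hhr
    have hlnone := (lastHas_spec rows req i).2 hl
    subst hnd
    refine ⟨by omega, by omega, Or.inl ⟨by omega, by rwa [show i + (r - i) = r by omega]⟩, ?_⟩
    rintro e he1 he2 (⟨hlt, hb⟩ | ⟨hle, hb⟩)
    · exact absurd hb (by simpa using hminr (i + e) (by omega) (by omega))
    · exact absurd hb (by simpa using hlnone (i - e) (by omega))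
  · -- lastHas some l, nextHas none
    obtain ⟨hli, hhl, hmaxl⟩ := (lastHas_spec rows req i).1 l hl
    have hne : l ≠ i := fun h => by rw [h, hno] at hhl; cases hhl
    have hrnone := (nextHas_spec rows req i).2 hr
    subst hnd
    refine ⟨by omega, by omega, Or.inr ⟨by omega, by rwa [show i - (i - l) = l by omega]⟩, ?_⟩
    rintro e he1 he2 (⟨hlt, hb⟩ | ⟨hle, hb⟩)
    · exact absurd hb (by simpa using hrnone (i + e) (by omega) (by omega))
    · exact absurd hb (by simpa using hmaxl (i - e) (by omega) (by omega))
  · -- both some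
    obtain ⟨hli, hhl, hmaxl⟩ := (lastHas_spec rows req i).1 l hl
    obtain ⟨hir, hrlen, hhr, hminr⟩ := (nextHas_spec rows req i).1 r hr
    have hnel : l ≠ i := fun h => by rw [h, hno] at hhl; cases hhl
    have hner : r ≠ i := fun h => by rw [h, hno] at hhr; cases hhr
    subst hnd
    refine ⟨by omega, by omega, ?_, ?_⟩
    · rcases Nat.lt_or_ge (r - i) (i - l) with hc | hc
      · exact Or.inl ⟨by omega, by rw [show i + min (i - l) (r - i) = r by omega]; exact hhr⟩
      · exact Or.inr ⟨by omega, by rw [show i - min (i - l) (r - i) = l by omega]; exact hhl⟩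
    · rintro e he1 he2 (⟨hlt, hb⟩ | ⟨hle, hb⟩)
      · exact absurd hb (by simpa using hminr (i + e) (by omega) (by omega))
      · exact absurd hb (by simpa using hmaxl (i - e) (by omega) (by omega))

lemma find_distance_eq_nd (rows : List (List (String × Bool))) (req : String) (i : Nat)
    (hi : i < rows.length) (hno : hasR rows req i = false) :
    find_distance rows (i : Int) req (rows.length : Int)
      = (match nd rows req i with | none => -1 | some m => (m : Int)) := by
  unfold find_distance
  cases hnd : nd rows req i with
  | none =>
    apply loop_none
    intro d h1 h2 hGd
    rw [Gd_iff rows req i d h1] at hGd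
    rcases hGd with ⟨hlt, hb⟩ | ⟨hle, hb⟩
    · rw [nd_none_facts rows req i hnd _ hlt] at hb; cases hb
    · rw [nd_none_facts rows req i hnd _ (by omega)] at hb; cases hb
  | some m =>
    obtain ⟨hm1, hmlen, hhit, hmin⟩ := nd_some_facts rows req i hi hno m hnd
    apply loop_min rows (i : Int) req (rows.length : Int) (m : Int) (by omega)
    · rw [Gd_iff rows req i (m : Int) (by omega)]
      simpa using hhit
    · omega
    · intro d hd1 hd2 hGd
      rw [Gd_iff rows req i d hd1] at hGd
      exact hmin d.toNat (by omega) (by omega) hGd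
-- value the forward sweep stores at index j
def fwdVal (rows : List (List (String × Bool))) (req : String) (j : Nat) : Option Int :=
  (lastHas rows req j).map (fun l => (j : Int) - (l : Int))

-- nd cast to the Int values the arrays hold
def ndI (rows : List (List (String × Bool))) (req : String) (j : Nat) : Option Int :=
  (nd rows req j).map (fun m => (m : Int))

-- the forward sweep's `last` variable before step j
def lastO (rows : List (List (String × Bool))) (req : String) : Nat → Option Int
  | 0 => none
  | j + 1 => (lastHas rows req j).map (fun l => (l : Int))

lemma lastO_step (rows : List (List (String × Bool))) (req : String) (j : Nat) :
    (if pyGetB (rows.getD j []) req then some (j : Int) else lastO rows req j)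
      = (lastHas rows req j).map (fun l => (l : Int)) := by
  cases j with
  | zero =>
    by_cases h : hasR rows req 0 <;> simp [hasR] at h <;> simp [lastO, lastHas, hasR, h]
  | succ j' =>
    by_cases h : hasR rows req (j' + 1) <;> simp [hasR] at h <;> simp [lastO, lastHas, hasR, h]

lemma fwd_spec (rows : List (List (String × Bool))) (req : String) :
    ∀ k : Nat, (List.range k).foldl (fstepB rows req) (none, [])
      = (lastO rows req k, (List.range k).map (fwdVal rows req)) := by
  intro k
  induction k with
  | zero => rfl
  | succ j ih =>
    rw [List.range_succ, List.foldl_append, ih, List.map_append]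
    simp only [List.foldl_cons, List.foldl_nil, fstepB]
    rw [lastO_step]
    refine congrArg₂ Prod.mk rfl ?_
    simp only [List.map_cons, List.map_nil, fwdVal]
    congr 1
    cases lastHas rows req j <;> rfl
lemma fwdVal_eq_ndI_of_next_none (rows : List (List (String × Bool))) (req : String) (j : Nat)
    (h : nextHas rows req j = none) : fwdVal rows req j = ndI rows req j := by
  unfold fwdVal ndI nd
  rw [h]
  cases hl : lastHas rows req j with
  | none => rfl
  | some l =>
    have := ((lastHas_spec rows req j).1 l hl).1
    simp
    omega

lemma bwd_spec (rows : List (List (String × Bool))) (req : String) :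
    ∀ k, k ≤ rows.length → ∀ (dl : List (Option Int)), dl.length = rows.length →
    (∀ j, j < k → dl.getD j none = fwdVal rows req j) →
    (∀ j, k ≤ j → j < rows.length → dl.getD j none = ndI rows req j) →
    ∀ j, j < rows.length →
      (((List.range k).reverse.foldl (bstepB rows req)
          ((nextHas rows req k).map (fun r => (r : Int)), dl)).2).getD j none = ndI rows req j := by
  intro k
  induction k with
  | zero =>
    intro _ dl _ _ hdone j hj
    simpa using hdone j (Nat.zero_le _) hj
  | succ k ih =>
    intro hk dl hlen hfwd hdone j hj
    rw [List.range_succ, List.reverse_append]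
    simp only [List.reverse_cons, List.reverse_nil, List.nil_append, List.foldl_append,
      List.foldl_cons, List.foldl_nil]
    have hkn : k < rows.length := by omega
    -- the step at index k
    have hnxt : (if pyGetB (rows.getD k []) req then some (k : Int)
        else (nextHas rows req (k + 1)).map (fun r => (r : Int)))
        = (nextHas rows req k).map (fun r => (r : Int)) := by
      rw [nextHas_rec rows req k hkn]
      by_cases h : hasR rows req k <;> simp [hasR] at h <;> simp [hasR, h]
    have hdk : dl.getD k none = fwdVal rows req k := hfwd k (by omega)
    -- the updated array
    have hstep : bstepB rows req ((nextHas rows req (k + 1)).map (fun r => (r : Int)), dl) k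
        = ((nextHas rows req k).map (fun r => (r : Int)),
           match (nextHas rows req k).map (fun r => (r : Int)) with
           | none => dl
           | some nx => match dl.getD k none with
             | none => dl.set k (some (nx - (k : Int)))
             | some cur => if nx - (k : Int) < cur then dl.set k (some (nx - (k : Int))) else dl) := by
      unfold bstepB
      rw [hnxt]
    rw [hstep]
    set dl' := (match (nextHas rows req k).map (fun r => (r : Int)) with
           | none => dl
           | some nx => match dl.getD k none with
             | none => dl.set k (some (nx - (k : Int)))
             | some cur => if nx - (k : Int) < cur then dl.set k (some (nx - (k : Int))) else dl)
      with hdl'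
    have hgetset : ∀ (v : Option Int) (j : Nat), (dl.set k v).getD j none
        = if j = k then (if k < dl.length then v else none) else dl.getD j none := by
      intro v j
      by_cases hjk : j = k
      · subst hjk
        rw [if_pos rfl, List.getD_eq_getElem?_getD]
        by_cases hin : j < dl.length
        · simp [hin]
        · simp [hin]
      · simp only [if_neg hjk, List.getD_eq_getElem?_getD,
          List.getElem?_set_ne (fun h => hjk h.symm)]
    have hlen' : dl'.length = rows.length := by
      rw [hdl']
      cases (nextHas rows req k).map (fun r => (r : Int)) with
      | none => exact hlen
      | some nx =>
        cases dl.getD k none with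
        | none => simp [hlen]
        | some cur =>
          dsimp only
          split <;> simp [hlen]
    have hat_k : dl'.getD k none = ndI rows req k := by
      cases hnk : nextHas rows req k with
      | none =>
        rw [hdl', hnk]
        show dl.getD k none = ndI rows req k
        rw [hdk]
        exact fwdVal_eq_ndI_of_next_none rows req k hnk
      | some r =>
        obtain ⟨hkr, hrlen, _, _⟩ := (nextHas_spec rows req k).1 r hnk
        rw [hdl', hnk, hdk]
        unfold fwdVal
        cases hlk : lastHas rows req k with
        | none =>
          show (dl.set k (some ((r : Int) - (k : Int)))).getD k none = ndI rows req k
          rw [hgetset]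
          simp only [hlen, if_pos hkn]
          unfold ndI nd
          rw [hlk, hnk]
          show some ((r : Int) - (k : Int)) = some (((r - k : Nat) : Int))
          simp only [Option.some.injEq]
          omega
        | some l =>
          have hlk2 := ((lastHas_spec rows req k).1 l hlk).1
          show (if (r : Int) - (k : Int) < (k : Int) - (l : Int)
              then dl.set k (some ((r : Int) - (k : Int))) else dl).getD k none = ndI rows req k
          by_cases hc : (r : Int) - (k : Int) < (k : Int) - (l : Int)
          · rw [if_pos hc, hgetset]
            simp only [hlen, if_pos hkn]
            unfold ndI nd
            rw [hlk, hnk]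
            show some ((r : Int) - (k : Int)) = some (((min (k - l) (r - k) : Nat) : Int))
            simp only [Option.some.injEq]
            omega
          · rw [if_neg hc, hdk]
            unfold fwdVal
            rw [hlk]
            show some ((k : Int) - (l : Int)) = ndI rows req k
            unfold ndI nd
            rw [hlk, hnk]
            show some ((k : Int) - (l : Int)) = some (((min (k - l) (r - k) : Nat) : Int))
            simp only [Option.some.injEq]
            omega
    have hother : ∀ j, j ≠ k → dl'.getD j none = dl.getD j none := by
      intro j hjk
      rw [hdl']
      cases (nextHas rows req k).map (fun r => (r : Int)) with
      | none => rfl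
      | some nx =>
        cases dl.getD k none with
        | none =>
          show (dl.set k (some (nx - (k : Int)))).getD j none = dl.getD j none
          rw [hgetset]
          simp [hjk]
        | some cur =>
          show (if nx - (k : Int) < cur then dl.set k (some (nx - (k : Int))) else dl).getD j none
            = dl.getD j none
          by_cases hc : nx - (k : Int) < cur
          · rw [if_pos hc, hgetset]
            simp [hjk]
          · rw [if_neg hc]
    exact ih (by omega) dl' hlen'
      (fun j hjk => by rw [hother j (by omega)]; exact hfwd j (by omega))
      (fun j hjk hjn => by
        rcases Nat.eq_or_lt_of_le hjk with h | h
        · exact h ▸ hat_k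
        · rw [hother j (by omega)]; exact hdone j (by omega) hjn)
      j hj

lemma nearestArr_spec (rows : List (List (String × Bool))) (req : String) (i : Nat)
    (hi : i < rows.length) :
    (nearestArr rows req).getD i none = (nd rows req i).map (fun m => (m : Int)) := by
  show (nearestArr rows req).getD i none = ndI rows req i
  unfold nearestArr
  simp only [fwd_spec rows req rows.length]
  have hb := bwd_spec rows req rows.length (le_refl _)
      ((List.range rows.length).map (fwdVal rows req))
      (by simp)
      (fun j hj => by
        rw [List.getD_eq_getElem?_getD]
        simp [hj])
      (fun j h1 h2 => by omega)
      i hi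
  have hnone : nextHas rows req rows.length = none := by
    unfold nextHas
    simp [nextHasAux]
  rw [hnone] at hb
  exact hb
lemma inner_eq (rows : List (List (String × Bool))) (i : Nat) (hi : i < rows.length) :
    ∀ (reqs : List String) (total mx : Int), 0 ≤ mx →
    innerA rows (rows.getD i []) (i : Int) (rows.length : Int) reqs total mx
      = innerB (reqs.map (nearestArr rows)) i total mx := by
  intro reqs
  induction reqs with
  | nil =>
    intro total mx _
    rfl
  | cons req rest ih =>
    intro total mx hmx
    simp only [List.map_cons, innerA, innerB]
    by_cases h : hasR rows req i
    · have hget : pyGetB (rows.getD i []) req = true := h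
      have harr : (nearestArr rows req).getD i none = some (0 : Int) := by
        rw [nearestArr_spec rows req i hi, nd_self rows req i hi h]
        rfl
      rw [harr, hget]
      show innerA rows (rows.getD i []) (↑i) (↑rows.length) rest total mx
        = innerB (List.map (nearestArr rows) rest) i (total + 0)
            (if (0 : Int) > mx then (0 : Int) else mx)
      rw [add_zero, if_neg (by omega : ¬ ((0 : Int) > mx))]
      exact ih total mx hmx
    · have hget : pyGetB (rows.getD i []) req = false := by
        simpa [hasR] using h
      rw [hget, find_distance_eq_nd rows req i hi hget]
      have harr := nearestArr_spec rows req i hi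
      cases hnd : nd rows req i with
      | none =>
        rw [hnd] at harr
        rw [harr]
        show (if (-1 : Int) = -1 then ((false, total, mx) : Bool × Int × Int)
              else innerA rows (rows.getD i []) (↑i) (↑rows.length) rest (total + -1) (max mx (-1)))
            = (false, total, mx)
        rw [if_pos rfl]
      | some m =>
        rw [hnd] at harr
        rw [harr]
        show (if ((m : Nat) : Int) = -1 then ((false, total, mx) : Bool × Int × Int)
              else innerA rows (rows.getD i []) (↑i) (↑rows.length) rest
                (total + ((m : Nat) : Int)) (max mx ((m : Nat) : Int)))
            = innerB (List.map (nearestArr rows) rest) i (total + ((m : Nat) : Int))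
                (if ((m : Nat) : Int) > mx then ((m : Nat) : Int) else mx)
        rw [if_neg (by omega : ¬ ((m : Nat) : Int) = -1)]
        rw [show max mx ((m : Nat) : Int)
            = (if ((m : Nat) : Int) > mx then ((m : Nat) : Int) else mx) from by split <;> omega]
        exact ih _ _ (by split <;> omega)

lemma fold_eq (rows : List (List (String × Bool))) (reqs : List String) :
    ∀ (idxs : List Nat), (∀ i ∈ idxs, i < rows.length) →
    ∀ (recs : List Int) (best : Option (Int × Int)),
    idxs.foldl (stepA rows reqs) (recs, best.map Prod.fst, best.map Prod.snd)
      = ((idxs.foldl (stepB (reqs.map (nearestArr rows))) (recs, best)).1,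
         (idxs.foldl (stepB (reqs.map (nearestArr rows))) (recs, best)).2.map Prod.fst,
         (idxs.foldl (stepB (reqs.map (nearestArr rows))) (recs, best)).2.map Prod.snd) := by
  intro idxs
  induction idxs with
  | nil =>
    intro _ recs best
    rfl
  | cons i rest ih =>
    intro hlt recs best
    have hi : i < rows.length := hlt i (List.mem_cons_self ..)
    simp only [List.foldl_cons]
    have hstep : stepA rows reqs (recs, best.map Prod.fst, best.map Prod.snd) i
        = ((stepB (reqs.map (nearestArr rows)) (recs, best) i).1,
           (stepB (reqs.map (nearestArr rows)) (recs, best) i).2.map Prod.fst,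
           (stepB (reqs.map (nearestArr rows)) (recs, best) i).2.map Prod.snd) := by
      simp only [stepA, stepB]
      rw [inner_eq rows i hi reqs 0 0 (le_refl 0)]
      set r := innerB (reqs.map (nearestArr rows)) i 0 0 with hr
      cases best with
      | none =>
        by_cases hv : r.1 <;> simp [hv, ltInf, eqInf]
      | some b =>
        by_cases hv : r.1
        · by_cases h1 : (r.2.1 < b.1 || (r.2.1 = b.1 && r.2.2 < b.2) : Bool)
          · simp [hv, ltInf, eqInf, h1]
          · by_cases h2 : (r.2.1 = b.1 && r.2.2 = b.2 : Bool)
            · simp [hv, ltInf, eqInf, h1, h2]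
            · simp [hv, ltInf, eqInf, h1, h2]
        · simp [hv]
    rw [hstep]
    exact ih (fun j hj => hlt j (List.mem_cons_of_mem _ hj)) _ _
lemma hasR_any_key (rows : List (List (String × Bool))) (req : String) (j : Nat)
    (hj : j < rows.length) (h : hasR rows req j = true) :
    rows.any (fun row => row.any (fun p => p.1 == req)) = true := by
  unfold hasR pyGetB at h
  cases hf : (rows.getD j []).find? (fun p => p.1 == req) with
  | none =>
    rw [hf] at h
    cases h
  | some p =>
    have hp : p.1 = req := by simpa using List.find?_some hf
    have hmem : p ∈ rows.getD j [] := List.mem_of_find?_eq_some hf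
    have hrow : rows.getD j [] ∈ rows := by
      rw [List.getD_eq_getElem?_getD, List.getElem?_eq_getElem hj]
      exact List.getElem_mem hj
    rw [List.any_eq_true]
    exact ⟨rows.getD j [], hrow, by rw [List.any_eq_true]; exact ⟨p, hmem, by simp [hp]⟩⟩

lemma nd_none_of_absent (rows : List (List (String × Bool))) (req : String) (i : Nat)
    (habs : ∀ j, j < rows.length → hasR rows req j = false) (hi : i < rows.length) :
    nd rows req i = none := by
  unfold nd
  cases hl : lastHas rows req i with
  | some l =>
    obtain ⟨h1, h2, _⟩ := (lastHas_spec rows req i).1 l hl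
    rw [habs l (by omega)] at h2
    cases h2
  | none =>
    cases hr : nextHas rows req i with
    | some r =>
      obtain ⟨_, h1, h2, _⟩ := (nextHas_spec rows req i).1 r hr
      rw [habs r h1] at h2
      cases h2
    | none => rfl

lemma innerA_invalid (rows : List (List (String × Bool))) (i : Nat) (hi : i < rows.length)
    (req : String) (habs : ∀ j, j < rows.length → hasR rows req j = false) :
    ∀ (reqs : List String), req ∈ reqs → ∀ (total mx : Int),
    (innerA rows (rows.getD i []) (i : Int) (rows.length : Int) reqs total mx).1 = false := by
  intro reqs
  induction reqs with
  | nil =>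
    intro h
    cases h
  | cons r rest ih =>
    intro hmem total mx
    simp only [innerA]
    by_cases hg : pyGetB (rows.getD i []) r = true
    · rw [hg]
      show (innerA rows (rows.getD i []) (i : Int) (rows.length : Int) rest total mx).1 = false
      rcases List.mem_cons.mp hmem with he | he
      · exfalso
        have hfalse := habs i hi
        rw [he] at hfalse
        unfold hasR at hfalse
        rw [hfalse] at hg
        cases hg
      · exact ih he total mx
    · have hg' : pyGetB (rows.getD i []) r = false := by simpa using hg
      rw [hg']
      by_cases hr : r = req
      · subst hr
        rw [find_distance_eq_nd rows r i hi hg', nd_none_of_absent rows r i habs hi]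
        rfl
      · show ((if find_distance rows (i : Int) r (rows.length : Int) = -1
            then ((false, total, mx) : Bool × Int × Int)
            else innerA rows (rows.getD i []) (i : Int) (rows.length : Int) rest
              (total + find_distance rows (i : Int) r (rows.length : Int))
              (max mx (find_distance rows (i : Int) r (rows.length : Int)))).1) = false
        split
        · rfl
        · have he : req ∈ rest := by
            rcases List.mem_cons.mp hmem with he | he
            · exact absurd he.symm hr
            · exact he
          exact ih he _ _

lemma foldA_const (rows : List (List (String × Bool))) (reqs : List String) (req : String)
    (habs : ∀ j, j < rows.length → hasR rows req j = false) (hreq : req ∈ reqs) :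
    ∀ (idxs : List Nat), (∀ i ∈ idxs, i < rows.length) →
    ∀ (st : List Int × Option Int × Option Int), idxs.foldl (stepA rows reqs) st = st := by
  intro idxs
  induction idxs with
  | nil =>
    intro _ st
    rfl
  | cons i rest ih =>
    intro hlt st
    rw [List.foldl_cons]
    have hstep : stepA rows reqs st i = st := by
      simp only [stepA]
      rw [innerA_invalid rows i (hlt i (List.mem_cons_self ..)) req habs reqs hreq 0 0]
      rfl
    rw [hstep]
    exact ih (fun j hj => hlt j (List.mem_cons_of_mem _ hj)) st

-- ===== VERDICT (by name: the statement is the Claim_ definition above) =====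
theorem find_recommendations_spec : Claim_equal_find_recommendations := by
  unfold Claim_equal_find_recommendations
  intro input1 input2 _
  unfold Spec_find_recommendations find_recommendations find_recommendations_alt
  by_cases hsup : input2.all (fun req => input1.any (fun row => row.any (fun p => p.1 == req))) = true
  · rw [if_pos hsup]
    have h := fold_eq input1 input2 (List.range input1.length)
        (fun i hi => List.mem_range.mp hi) [] none
    show (((List.range input1.length).foldl (stepA input1 input2)
        ([], (none : Option (Int × Int)).map Prod.fst, (none : Option (Int × Int)).map Prod.snd)).1 : List Int)
      = _
    rw [h]
  · rw [if_neg hsup]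
    have hex : ∃ req ∈ input2, ¬ input1.any (fun row => row.any (fun p => p.1 == req)) = true := by
      by_contra hc
      push Not at hc
      exact hsup (List.all_eq_true.mpr hc)
    obtain ⟨req, hin, hnot⟩ := hex
    have habs : ∀ j, j < input1.length → hasR input1 req j = false := by
      intro j hj
      by_contra h
      exact hnot (hasR_any_key input1 req j hj (by simpa using h))
    rw [foldA_const input1 input2 req habs hin (List.range input1.length)
        (fun i hi => List.mem_range.mp hi) ([], none, none)]
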